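-- pv_equiv track=rewrite | github.com/bhuvi2018/Infytq | PF/Practice 1-10.py | count_digits_letters
-- ===== SOURCE A (Python) =====
-- def count_digits_letters(sentence):
--     l=[]
--     c1=0
--     c2=0
--     for i in sentence:
--         if(ord(i)>=65 and ord(i)<=90 or ord(i)>=97 and ord(i)<=122):
--             c1+=1
--         elif((ord(i)>=0 or ord(i)<=9) and not(i==" ")):
--             c2+=1
--     l.append(c1)
--     l.append(c2)
--     return l
-- ===== SOURCE B (Python) =====
-- def count_digits_letters(sentence):
--     letters = sum(1 for c in sentence if 'A' <= c <= 'Z' or 'a' <= c <= 'z')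
--     spaces = sentence.count(' ')
--     return [letters, len(sentence) - spaces - letters]
-- ===== Notes on version B (the rewrite author's own statement) =====
-- stated objective: alternative
-- what changed: B replaces A's single two-counter loop with separate counts: letters counted by ASCII range, spaces via str.count, and the non-space-non-letter total derived by subtraction from the length.
import Mathlib
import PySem

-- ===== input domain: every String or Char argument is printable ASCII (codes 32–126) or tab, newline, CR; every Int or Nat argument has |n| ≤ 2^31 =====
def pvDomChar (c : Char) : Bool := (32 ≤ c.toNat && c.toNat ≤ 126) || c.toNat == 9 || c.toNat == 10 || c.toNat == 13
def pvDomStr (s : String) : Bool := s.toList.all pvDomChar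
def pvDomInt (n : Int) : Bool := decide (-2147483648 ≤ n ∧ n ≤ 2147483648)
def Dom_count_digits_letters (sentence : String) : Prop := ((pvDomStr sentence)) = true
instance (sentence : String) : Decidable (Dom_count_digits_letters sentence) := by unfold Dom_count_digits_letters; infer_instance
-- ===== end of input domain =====

-- B replaces A's single two-counter loop with separate counts (letters by ASCII range,
-- spaces via str.count) and derives the third quantity by subtraction; objective: alternative.

-- ===== PORT A =====
-- one pass, two counters c1/c2, branch order as in A
def count_digits_letters (sentence : String) : List Int :=
  let st := sentence.toList.foldl
    (fun (p : Int × Int) i =>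
      if (65 ≤ i.toNat ∧ i.toNat ≤ 90) ∨ (97 ≤ i.toNat ∧ i.toNat ≤ 122) then
        (p.1 + 1, p.2)
      else if (0 ≤ i.toNat ∨ i.toNat ≤ 9) ∧ ¬ (i = ' ') then
        (p.1, p.2 + 1)
      else p) (0, 0)
  [st.1, st.2]

-- ===== PORT B =====
def count_digits_letters_alt (sentence : String) : List Int :=
  let letters : Int :=
    (sentence.toList.countP (fun c => ('A' ≤ c ∧ c ≤ 'Z') ∨ ('a' ≤ c ∧ c ≤ 'z')) : Int)
  let spaces : Int := (PySem.Str.count sentence " " : Int)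
  [letters, (PySem.Str.len sentence : Int) - spaces - letters]

-- ===== PRECONDITION & SPEC =====
def Spec_count_digits_letters (sentence : String) (out : List Int) : Prop := out = count_digits_letters_alt sentence
instance (sentence : String) (out : List Int) : Decidable (Spec_count_digits_letters sentence out) := by unfold Spec_count_digits_letters; infer_instance

-- ===== CLAIM (what is proved, stated in full; the proofs are below) =====
def Claim_equal_count_digits_letters : Prop := ∀ (sentence : String), Dom_count_digits_letters sentence → Spec_count_digits_letters sentence (count_digits_letters sentence)

-- ===== LEMMAS AND PROOFS =====

-- A's loop adds the letter-count to c1 and the non-space-non-letter count to c2.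
theorem pvFoldA (l : List Char) (c1 c2 : Int) :
    l.foldl
      (fun (p : Int × Int) i =>
        if (65 ≤ i.toNat ∧ i.toNat ≤ 90) ∨ (97 ≤ i.toNat ∧ i.toNat ≤ 122) then
          (p.1 + 1, p.2)
        else if (0 ≤ i.toNat ∨ i.toNat ≤ 9) ∧ ¬ (i = ' ') then
          (p.1, p.2 + 1)
        else p) (c1, c2)
    = (c1 + (l.countP (fun c => ('A' ≤ c ∧ c ≤ 'Z') ∨ ('a' ≤ c ∧ c ≤ 'z')) : Int),
       c2 + (l.countP (fun c => ¬ (('A' ≤ c ∧ c ≤ 'Z') ∨ ('a' ≤ c ∧ c ≤ 'z')) ∧ c ≠ ' ') : Int)) := by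
  induction l generalizing c1 c2 with
  | nil => simp
  | cons h t ih =>
    have hrange : ((65 ≤ h.toNat ∧ h.toNat ≤ 90) ∨ (97 ≤ h.toNat ∧ h.toNat ≤ 122)) ↔
        (('A' ≤ h ∧ h ≤ 'Z') ∨ ('a' ≤ h ∧ h ≤ 'z')) := by
      constructor <;> intro hc <;>
        rcases hc with ⟨a, b⟩ | ⟨a, b⟩ <;>
        [left; right; left; right] <;>
        exact ⟨by simpa [Char.le_def] using a, by simpa [Char.le_def] using b⟩
    simp only [List.foldl_cons, List.countP_cons]
    by_cases hl : ('A' ≤ h ∧ h ≤ 'Z') ∨ ('a' ≤ h ∧ h ≤ 'z')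
    · rw [if_pos (hrange.mpr hl), ih]
      simp [hl]
      ring
    · rw [if_neg (fun hc => hl (hrange.mp hc))]
      by_cases hs : h = ' '
      · subst hs
        rw [if_neg (by simp), ih]
        simp
      · rw [if_pos ⟨Or.inl (Nat.zero_le _), hs⟩, ih]
        simp [hl, hs]
        ring

-- Chars.count with a single-character needle is List.count.
theorem pvCountGoSingleton (c : Char) (l : List Char) (fuel : Nat) (acc : Nat)
    (h : l.length ≤ fuel) :
    PySem.Chars.count.go [c] fuel l acc = acc + l.count c := by
  induction l generalizing fuel acc with
  | nil => cases fuel <;> simp [PySem.Chars.count.go]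
  | cons hd t ih =>
    cases fuel with
    | zero => simp at h
    | succ n =>
      simp only [List.length_cons, Nat.succ_le_succ_iff] at h
      by_cases he : hd = c
      · subst he
        simp only [PySem.Chars.count.go, List.isPrefixOf, BEq.rfl, Bool.true_and,
          if_true, List.length_cons, List.length_nil, List.drop_succ_cons, List.drop_zero]
        rw [ih _ _ h]
        simp
        omega
      · have : [c].isPrefixOf (hd :: t) = false := by
          simp [List.isPrefixOf, Ne.symm he]
        simp only [PySem.Chars.count.go, this, Bool.false_eq_true, if_false]
        rw [ih _ _ h]
        simp [he]

theorem pvStrCountSpace (s : String) :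
    PySem.Str.count s " " = s.toList.count ' ' := by
  rw [PySem.Str.count_eq]
  show PySem.Chars.count s.toList [' '] = _
  rw [PySem.Chars.count]
  simp only [List.isEmpty_cons, if_false, Bool.false_eq_true]
  exact (pvCountGoSingleton ' ' s.toList s.toList.length 0 le_rfl).trans (by simp)

-- the three char-classes partition the string
theorem pvPartition (l : List Char) :
    (l.countP (fun c => ¬ (('A' ≤ c ∧ c ≤ 'Z') ∨ ('a' ≤ c ∧ c ≤ 'z')) ∧ c ≠ ' ') : Int)
      = (l.length : Int) - (l.count ' ' : Int)
        - (l.countP (fun c => ('A' ≤ c ∧ c ≤ 'Z') ∨ ('a' ≤ c ∧ c ≤ 'z')) : Int) := by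
  induction l with
  | nil => simp
  | cons h t ih =>
    by_cases hl : ('A' ≤ h ∧ h ≤ 'Z') ∨ ('a' ≤ h ∧ h ≤ 'z')
    · have hs : h ≠ ' ' := by
        rcases hl with ⟨a, b⟩ | ⟨a, b⟩ <;> intro he <;> subst he <;>
          simp [Char.le_def] at a b
      rw [List.countP_cons_of_neg (by simp [hl, hs]),
          List.countP_cons_of_pos (by simp [hl]),
          List.count_cons_of_ne hs, List.length_cons]
      push_cast
      rw [ih]
      ring
    · by_cases hs : h = ' '
      · subst hs
        rw [List.countP_cons_of_neg (by simp),
            List.countP_cons_of_neg (by simp),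
            List.count_cons_self, List.length_cons]
        push_cast
        rw [ih]
        ring
      · rw [List.countP_cons_of_pos (by simp [hl, hs]),
            List.countP_cons_of_neg (by simp [hl]),
            List.count_cons_of_ne hs, List.length_cons]
        push_cast
        rw [ih]
        ring

-- ===== VERDICT (by name: the statement is the Claim_ definition above) =====
theorem count_digits_letters_spec : Claim_equal_count_digits_letters := by
  intro s _
  unfold Spec_count_digits_letters count_digits_letters count_digits_letters_alt
  simp only [pvFoldA, pvStrCountSpace, PySem.Str.len]
  rw [pvPartition]
  simp
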